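-- pv_equiv track=rewrite | github.com/nbnguyen1997/LearningPython | Chapter9/exercise4.py | handling_string
-- ===== SOURCE A (Python) =====
-- def handling_string(string):
--     temp = string.lower()
--     result=''
--     for letter in temp:
--         if letter == ' ' or is_exit_letter(letter,result):
--             pass
--         else:
--             result+= letter
--
--     return result
--
-- def is_exit_letter(letter,string):
--     for item in string:
--         if item == letter or item == letter.lower():
--             return True
--
--     return False
-- ===== SOURCE B (Python) =====
-- def handling_string(string):
--     s = string.lower()
--     return ''.join(c for i, c in enumerate(s) if c != ' ' and s.index(c) == i)
-- ===== Notes on version B (the rewrite author's own statement) =====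
-- stated objective: idiomatic
-- what changed: Replaces A's accumulate-and-rescan-the-result loop (helper scanning the growing output for each char) with a single join over enumerate that keeps a character exactly when its index is the first occurrence of that character in the lowercased string; no output accumulator or membership helper remains.
import Mathlib
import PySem

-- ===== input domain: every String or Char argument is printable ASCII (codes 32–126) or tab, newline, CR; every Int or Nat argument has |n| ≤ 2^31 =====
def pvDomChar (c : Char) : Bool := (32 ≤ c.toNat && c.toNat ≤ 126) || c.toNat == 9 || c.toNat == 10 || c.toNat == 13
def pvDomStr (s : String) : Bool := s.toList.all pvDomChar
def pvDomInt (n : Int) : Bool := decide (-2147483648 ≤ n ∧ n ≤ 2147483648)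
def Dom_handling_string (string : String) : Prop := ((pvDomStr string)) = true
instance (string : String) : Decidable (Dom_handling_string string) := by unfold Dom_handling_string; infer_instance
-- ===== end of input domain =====

-- B rewrites A's accumulate-and-rescan loop as a single join over enumerate keeping each
-- character at its first-occurrence index (objective: idiomatic, same asymptotic cost).

-- ===== PORT A =====
-- helper is_exit_letter: scans `string` and returns True at the first matching item
-- (letter.lower() on a one-char string ported as PySem.Chars.lowerChar; exact on ASCII domain)
def hsIsExitLetter (letter : Char) (string : List Char) : Bool :=
  string.any (fun item => item == letter || item == PySem.Chars.lowerChar letter)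

def handling_string (string : String) : String :=
  let temp := PySem.Str.lower string
  String.ofList (temp.toList.foldl
    (fun result letter =>
      if letter == ' ' || hsIsExitLetter letter result then result
      else result ++ [letter]) [])

-- ===== PORT B =====
def handling_string_alt (string : String) : String :=
  let s := PySem.Str.lower string
  String.ofList (((PySem.List.enumerate s.toList 0).filter
      (fun p => p.2 != ' ' &&
        ((PySem.List.index? s.toList p.2).map Int.ofNat == some p.1))).map (·.2))

-- ===== PRECONDITION & SPEC =====
def Spec_handling_string (string : String) (out : String) : Prop := out = handling_string_alt string
instance (string : String) (out : String) : Decidable (Spec_handling_string string out) := by unfold Spec_handling_string; infer_instance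

-- ===== CLAIM (what is proved, stated in full; the proofs are below) =====
def Claim_equal_handling_string : Prop := ∀ (string : String), Dom_handling_string string → Spec_handling_string string (handling_string string)

-- ===== LEMMAS AND PROOFS =====

-- lowerChar is idempotent on ASCII (checked exhaustively)
theorem hsLower128 : ∀ n, n < 128 →
    PySem.Chars.lowerChar (PySem.Chars.lowerChar (Char.ofNat n)) = PySem.Chars.lowerChar (Char.ofNat n) := by
  decide

theorem hsMemLowerFixed (s : String) (hd : Dom_handling_string s) :
    ∀ c ∈ PySem.Chars.lower s.toList, PySem.Chars.lowerChar c = c := by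
  intro c hc
  simp only [PySem.Chars.lower, List.mem_map] at hc
  obtain ⟨d, hdm, rfl⟩ := hc
  have hdc : pvDomChar d = true := by
    unfold Dom_handling_string pvDomStr at hd
    rw [List.all_eq_true] at hd
    exact hd d hdm
  have hn : d.toNat < 128 := by
    simp only [pvDomChar, Bool.or_eq_true, Bool.and_eq_true, decide_eq_true_eq, beq_iff_eq] at hdc
    omega
  have := hsLower128 d.toNat hn
  rwa [Char.ofNat_toNat] at this

-- reference selector: keep c unless it is a space or already selected
def hsSelect (acc : List Char) : List Char → List Char
  | [] => []
  | c :: cs => if c = ' ' ∨ c ∈ acc then hsSelect acc cs else c :: hsSelect (acc ++ [c]) cs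

theorem hsExitEq (acc : List Char) (c : Char) (hc : PySem.Chars.lowerChar c = c) :
    (c == ' ' || hsIsExitLetter c acc) = decide (c = ' ' ∨ c ∈ acc) := by
  simp only [hsIsExitLetter, hc, Bool.or_self]
  rw [Bool.eq_iff_iff]
  simp only [Bool.or_eq_true, beq_iff_eq, List.any_eq_true, decide_eq_true_eq]
  constructor
  · rintro (h | ⟨x, hx, rfl⟩)
    · exact Or.inl h
    · exact Or.inr hx
  · rintro (h | h)
    · exact Or.inl h
    · exact Or.inr ⟨c, h, rfl⟩

theorem hsFoldA : ∀ (L acc : List Char), (∀ c ∈ L, PySem.Chars.lowerChar c = c) →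
    L.foldl (fun result letter =>
      if letter == ' ' || hsIsExitLetter letter result then result
      else result ++ [letter]) acc = acc ++ hsSelect acc L := by
  intro L
  induction L with
  | nil => intro acc _; simp [hsSelect]
  | cons c cs ih =>
    intro acc h
    have hc := h c (List.mem_cons_self)
    have hrest : ∀ d ∈ cs, PySem.Chars.lowerChar d = d := fun d hd => h d (List.mem_cons_of_mem _ hd)
    simp only [List.foldl_cons, hsSelect, hsExitEq acc c hc]
    by_cases hcase : c = ' ' ∨ c ∈ acc
    · rw [if_pos (by simpa using hcase), if_pos hcase, ih acc hrest]
    · rw [if_neg (by simpa using hcase), if_neg hcase, ih (acc ++ [c]) hrest,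
        List.append_assoc, List.singleton_append]

theorem hsSelB : ∀ (rest pre acc : List Char),
    (∀ d : Char, d ≠ ' ' → (d ∈ acc ↔ d ∈ pre)) →
    ((PySem.List.enumerate rest (pre.length : Int)).filter
        (fun p => p.2 != ' ' &&
          ((PySem.List.index? (pre ++ rest) p.2).map Int.ofNat == some p.1))).map (·.2)
      = hsSelect acc rest := by
  intro rest
  induction rest with
  | nil => intro pre acc _; simp [PySem.List.enumerate_nil, hsSelect]
  | cons c cs ih =>
    intro pre acc hinv
    rw [PySem.List.enumerate_cons]
    have hsplit : pre ++ c :: cs = (pre ++ [c]) ++ cs := by simp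
    have hlen : ((pre : List Char).length : Int) + 1 = ((pre ++ [c]).length : Int) := by
      simp
    by_cases hsp : c = ' '
    · -- space: dropped by both
      have hcond : ((c != ' ') &&
          ((PySem.List.index? (pre ++ c :: cs) c).map Int.ofNat == some (pre.length : Int))) = false := by
        simp [hsp]
      rw [List.filter_cons_of_neg (by simpa using hcond)]
      rw [hsplit, hlen, ih (pre ++ [c]) acc ?_]
      · simp [hsSelect, hsp]
      · intro d hd
        rw [hinv d hd, List.mem_append, List.mem_singleton]
        constructor
        · exact Or.inl
        · rintro (h | rfl)
          · exact h
          · exact absurd hsp hd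
    · by_cases hm : c ∈ pre
      · -- seen before: first occurrence is earlier, both drop it
        obtain ⟨k, hk⟩ : ∃ k, PySem.List.index? pre c = some k := by
          have := (PySem.List.index?_isSome_iff (xs := pre) (v := c)).mpr hm
          exact Option.isSome_iff_exists.mp this
        have hklt : k < pre.length := by
          rw [PySem.List.index?_eq_some_iff] at hk
          obtain ⟨p, s, hps, hlen', _⟩ := hk
          subst hps
          simp [← hlen']
        have hidx : PySem.List.index? (pre ++ c :: cs) c = some k := by
          rw [PySem.List.index?_append_of_mem _ hm, hk]
        have hcond : ((c != ' ') &&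
            ((PySem.List.index? (pre ++ c :: cs) c).map Int.ofNat == some (pre.length : Int))) = false := by
          rw [hidx]
          simp only [Option.map_some, Bool.and_eq_false_iff, beq_eq_false_iff_ne]
          right
          intro h
          have : (k : Int) = pre.length := by simpa using h
          omega
        rw [List.filter_cons_of_neg (by simpa using hcond)]
        rw [hsplit, hlen, ih (pre ++ [c]) acc ?_]
        · have : c ∈ acc := (hinv c hsp).mpr hm
          simp [hsSelect, this]
        · intro d hd
          rw [hinv d hd, List.mem_append, List.mem_singleton]
          constructor
          · exact Or.inl
          · rintro (h | rfl)
            · exact h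
            · exact hm
      · -- first occurrence: both keep it
        have hidx : PySem.List.index? (pre ++ c :: cs) c = some pre.length := by
          rw [hsplit, PySem.List.index?_append_of_mem cs (by simp),
            PySem.List.index?_append_singleton_self pre c hm]
        have hcond : ((c != ' ') &&
            ((PySem.List.index? (pre ++ c :: cs) c).map Int.ofNat == some (pre.length : Int))) = true := by
          rw [hidx]
          simp [hsp]
        rw [List.filter_cons_of_pos (by simpa using hcond)]
        have hnacc : c ∉ acc := fun h => hm ((hinv c hsp).mp h)
        rw [List.map_cons]
        rw [hsplit, hlen, ih (pre ++ [c]) (acc ++ [c]) ?_]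
        · simp [hsSelect, hsp, hnacc]
        · intro d hd
          simp only [List.mem_append, List.mem_singleton]
          rw [hinv d hd]

-- ===== VERDICT (by name: the statement is the Claim_ definition above) =====
theorem handling_string_spec : Claim_equal_handling_string := by
  intro s hd
  unfold Spec_handling_string handling_string handling_string_alt
  simp only [PySem.Str.toList_lower]
  set L := PySem.Chars.lower s.toList with hL
  have hfix := hsMemLowerFixed s hd
  rw [hsFoldA L [] hfix, List.nil_append]
  have h2 := hsSelB L [] [] (by intro d _; simp)
  rw [List.nil_append] at h2
  simp only [List.length_nil, Nat.cast_zero] at h2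
  rw [h2]
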